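-- pv_equiv track=rewrite | github.com/Tommolo/Group_Key_Gen_Reconciliation | utils.py | find_max_with_list_names
-- ===== SOURCE A (Python) =====
-- def find_max_with_list_names(dict_samples_SI):
--     results = []
--     # Extract the list names and the lists from the dictionary
--     names = list(dict_samples_SI.keys())
--     lists = list(dict_samples_SI.values())
--
--     # Iterate through the corresponding elements of the lists
--     for elements in zip(*lists):
--         max_value = max(elements)
--         max_index = elements.index(max_value)
--         # Add the maximum value and the name of the list it came from
--         results.append((names[max_index]))
--
--     return results
-- ===== SOURCE B (Python) =====
-- def find_max_with_list_names(dict_samples_SI):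
--     items = list(dict_samples_SI.items())
--     if not items:
--         return []
--     ncols = min(len(lst) for _, lst in items)
--     first_name, first_list = items[0]
--     best_value = first_list[:ncols]
--     best_owner = [first_name] * ncols
--     for name, lst in items[1:]:
--         for c in range(ncols):
--             if lst[c] > best_value[c]:
--                 best_value[c] = lst[c]
--                 best_owner[c] = name
--     return best_owner
-- ===== Notes on version B (the rewrite author's own statement) =====
-- stated objective: alternative
-- what changed: Instead of transposing with zip(*lists) and running max()+.index() independently on each column tuple, B sweeps the dict row by row, maintaining per-column running best_value/best_owner arrays updated on a strict '>' (so ties stay with the earliest list, like .index).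
import Mathlib
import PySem

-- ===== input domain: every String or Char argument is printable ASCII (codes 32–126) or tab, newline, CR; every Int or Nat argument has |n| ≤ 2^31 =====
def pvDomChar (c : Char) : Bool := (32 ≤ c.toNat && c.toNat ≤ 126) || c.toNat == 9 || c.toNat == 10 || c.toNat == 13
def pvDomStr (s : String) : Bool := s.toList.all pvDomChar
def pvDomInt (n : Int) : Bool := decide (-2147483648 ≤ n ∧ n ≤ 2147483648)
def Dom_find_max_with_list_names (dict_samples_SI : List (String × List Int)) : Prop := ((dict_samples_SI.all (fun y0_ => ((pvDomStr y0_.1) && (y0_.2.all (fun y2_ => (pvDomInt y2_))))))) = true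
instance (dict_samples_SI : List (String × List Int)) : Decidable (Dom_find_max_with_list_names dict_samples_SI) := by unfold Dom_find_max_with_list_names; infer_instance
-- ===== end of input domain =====

-- B replaces A's per-column max()+.index() over zip(*lists) by a row-by-row sweep keeping
-- per-column running maxima and owners (objective: alternative decomposition, same cost).

-- ===== PORT A =====
-- Model of zip(*lists): the columns, indexed 0..min-length-1 (lists[i].getD t 0 = lists[i][t]
-- exactly, since t < length of every list there); zip(*[]) = [].
def pyZipStar (lists : List (List Int)) : List (List Int) :=
  match lists with
  | [] => []
  | l :: ls =>
    let m := ls.foldl (fun a b => min a b.length) l.length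
    (List.range m).map (fun t => (l :: ls).map (fun u => u.getD t 0))

def find_max_with_list_names (dict_samples_SI : List (String × List Int)) : List String :=
  let dd := PySem.Dict.ofList dict_samples_SI
  let names := dd.keys
  let lists := dd.values
  -- for elements in zip(*lists): results.append(names[elements.index(max(elements))])
  -- elements is never empty and the index is always in range, so the .getD defaults are never used
  (pyZipStar lists).foldl (fun results elements =>
      let max_value := (PySem.List.max? elements (fun x => x)).getD 0
      let max_index := (PySem.List.index? elements max_value).getD 0
      results ++ [names.getD max_index ""]) []

-- ===== PORT B =====
def find_max_with_list_names_alt (dict_samples_SI : List (String × List Int)) : List String :=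
  match (PySem.Dict.ofList dict_samples_SI).items with
  | [] => []
  | (first_name, first_list) :: rest =>
    let ncols := rest.foldl (fun a p => min a p.2.length) first_list.length
    -- best_value = first_list[:ncols]; best_owner = [first_name] * ncols
    let init : List Int × List String := (first_list.take ncols, List.replicate ncols first_name)
    -- for name, lst in items[1:]: for c in range(ncols): strict-> update (c < ncols = both
    -- lengths throughout, so the .getD/.set are Python's in-range reads/writes exactly)
    let fin := rest.foldl (fun st p =>
        (List.range ncols).foldl (fun st c =>
          if st.1.getD c 0 < p.2.getD c 0 then (st.1.set c (p.2.getD c 0), st.2.set c p.1)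
          else st) st) init
    fin.2

-- ===== PRECONDITION & SPEC =====
def Spec_find_max_with_list_names (dict_samples_SI : List (String × List Int)) (out : List String) : Prop := out = find_max_with_list_names_alt dict_samples_SI
instance (dict_samples_SI : List (String × List Int)) (out : List String) : Decidable (Spec_find_max_with_list_names dict_samples_SI out) := by unfold Spec_find_max_with_list_names; infer_instance

-- ===== CLAIM (what is proved, stated in full; the proofs are below) =====
def Claim_equal_find_max_with_list_names : Prop := ∀ (dict_samples_SI : List (String × List Int)), Dom_find_max_with_list_names dict_samples_SI → Spec_find_max_with_list_names dict_samples_SI (find_max_with_list_names dict_samples_SI)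

-- ===== LEMMAS AND PROOFS =====

-- B's inner per-row loop over range ncols, as a named step
def pvBStep (l : List Int) (n : String) (st : List Int × List String) (c : Nat) : List Int × List String :=
  if st.1.getD c 0 < l.getD c 0 then (st.1.set c (l.getD c 0), st.2.set c n) else st

-- one column's running (best value, best owner) update
def pvColStep (a : Int × String) (p : Int × String) : Int × String :=
  if a.1 < p.1 then p else a

def pvColFold (rows : List (String × List Int)) (t : Nat) (a : Int × String) : Int × String :=
  rows.foldl (fun a p => pvColStep a (p.2.getD t 0, p.1)) a

theorem pv_getD_map_range {α : Type} (F : Nat → α) (d : α) {c m : Nat} (hc : c < m) :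
    (((List.range m).map F).getD c d) = F c := by
  simp [List.getD, hc]

theorem pv_take_eq_map_range (l : List Int) (m : Nat) (h : m ≤ l.length) :
    l.take m = (List.range m).map (fun t => l.getD t 0) := by
  apply List.ext_getElem
  · simp [h]
  · intro i h1 h2
    simp at h2
    simp [List.getElem_take, List.getD, List.getElem?_eq_getElem (lt_of_lt_of_le h2 h)]

theorem pv_replicate_eq_map_range {α : Type} (m : Nat) (a : α) :
    List.replicate m a = (List.range m).map (fun _ => a) := by
  apply List.ext_getElem <;> simp

theorem pv_minfold_le (rest : List (String × List Int)) :
    ∀ s : Nat, rest.foldl (fun a p => min a p.2.length) s ≤ s := by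
  induction rest with
  | nil => intro s; simp
  | cons p t ih =>
    intro s
    exact le_trans (ih (min s p.2.length)) (Nat.min_le_left _ _)

-- the inner loop, on arbitrary lists, as a pointwise mapIdx
theorem pv_if_shift {α : Type} {i k : Nat} (P : Prop) [Decidable P] (a b : α) (hik : i ≠ k) :
    (if i < k ∧ P then a else b) = (if i < k + 1 ∧ P then a else b) := by
  apply if_congr _ rfl rfl
  constructor
  · rintro ⟨h, hp⟩; exact ⟨by omega, hp⟩
  · rintro ⟨h, hp⟩; exact ⟨by omega, hp⟩

theorem pv_inner_mapIdx (l : List Int) (n : String) :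
    ∀ (k : Nat) (u : List Int) (v : List String),
      (List.range k).foldl (pvBStep l n) (u, v) =
      (u.mapIdx (fun c x => if c < k ∧ x < l.getD c 0 then l.getD c 0 else x),
       v.mapIdx (fun c y => if c < k ∧ u.getD c 0 < l.getD c 0 then n else y)) := by
  intro k
  induction k with
  | zero =>
    intro u v
    simp only [List.range_zero, List.foldl_nil, Prod.mk.injEq]
    refine ⟨?_, ?_⟩ <;> (apply List.ext_getElem <;> simp)
  | succ k ih =>
    intro u v
    rw [List.range_succ, List.foldl_append, ih]
    simp only [List.foldl_cons, List.foldl_nil]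
    have hu_getD : ((u.mapIdx (fun c x => if c < k ∧ x < l.getD c 0 then l.getD c 0 else x)).getD k 0) = u.getD k 0 := by
      by_cases hk : k < u.length
      · simp [List.getD, hk]
      · rw [List.getD, List.getD, List.getElem?_eq_none_iff.mpr, List.getElem?_eq_none_iff.mpr]
        · exact Nat.le_of_not_lt hk
        · simpa using Nat.le_of_not_lt hk
    unfold pvBStep
    rw [hu_getD]
    by_cases hcond : u.getD k 0 < l.getD k 0
    · rw [if_pos hcond]
      simp only [Prod.mk.injEq]
      refine ⟨?_, ?_⟩
      · apply List.ext_getElem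
        · simp
        · intro i h1 h2
          simp only [List.length_set, List.length_mapIdx] at h1
          by_cases hik : i = k
          · subst hik
            rw [List.getElem_set_self]
            have hx : u[i] = u.getD i 0 := (List.getD_eq_getElem u 0 (by simpa using h2)).symm
            simp only [List.getElem_mapIdx]
            rw [if_pos ⟨by omega, by rw [hx]; exact hcond⟩]
          · rw [List.getElem_set_ne (by omega)]
            simp only [List.getElem_mapIdx]
            exact pv_if_shift _ _ _ hik
      · apply List.ext_getElem
        · simp
        · intro i h1 h2
          simp only [List.length_set, List.length_mapIdx] at h1
          by_cases hik : i = k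
          · subst hik
            rw [List.getElem_set_self]
            simp only [List.getElem_mapIdx]
            rw [if_pos ⟨by omega, hcond⟩]
          · rw [List.getElem_set_ne (by omega)]
            simp only [List.getElem_mapIdx]
            exact pv_if_shift _ _ _ hik
    · rw [if_neg hcond]
      simp only [Prod.mk.injEq]
      refine ⟨?_, ?_⟩
      · apply List.ext_getElem
        · simp
        · intro i h1 h2
          simp only [List.length_mapIdx] at h1
          simp only [List.getElem_mapIdx]
          by_cases hik : i = k
          · subst hik
            have hx : u[i] = u.getD i 0 := (List.getD_eq_getElem u 0 (by simpa using h2)).symm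
            rw [if_neg (by rintro ⟨-, h⟩; rw [hx] at h; omega),
                if_neg (by rintro ⟨h2, h⟩; rw [hx] at h; omega)]
          · exact pv_if_shift _ _ _ hik
      · apply List.ext_getElem
        · simp
        · intro i h1 h2
          simp only [List.length_mapIdx] at h1
          simp only [List.getElem_mapIdx]
          by_cases hik : i = k
          · subst hik
            rw [if_neg (by rintro ⟨-, h⟩; omega),
                if_neg (by rintro ⟨h2, h⟩; omega)]
          · exact pv_if_shift _ _ _ hik

-- the inner loop on range-m-shaped state
theorem pv_inner_range (m : Nat) (l : List Int) (n : String) (F : Nat → Int) (G : Nat → String) :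
    (List.range m).foldl (pvBStep l n) ((List.range m).map F, (List.range m).map G) =
    ((List.range m).map (fun t => if F t < l.getD t 0 then l.getD t 0 else F t),
     (List.range m).map (fun t => if F t < l.getD t 0 then n else G t)) := by
  rw [pv_inner_mapIdx]
  simp only [Prod.mk.injEq]
  refine ⟨?_, ?_⟩
  · apply List.ext_getElem
    · simp
    · intro i h1 h2
      simp only [List.getElem_mapIdx, List.getElem_map, List.getElem_range]
      simp at h1
      simp [h1]
  · apply List.ext_getElem
    · simp
    · intro i h1 h2
      simp only [List.getElem_mapIdx, List.getElem_map, List.getElem_range]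
      simp at h1
      rw [pv_getD_map_range F 0 h1]
      simp [h1]

-- B's outer loop commutes into one independent fold per column
theorem pv_outer (m : Nat) :
    ∀ (rows : List (String × List Int)) (F : Nat → Int) (G : Nat → String),
      rows.foldl (fun st p => (List.range m).foldl (pvBStep p.2 p.1) st)
        ((List.range m).map F, (List.range m).map G) =
      ((List.range m).map (fun t => (pvColFold rows t (F t, G t)).1),
       (List.range m).map (fun t => (pvColFold rows t (F t, G t)).2)) := by
  intro rows
  induction rows with
  | nil => intro F G; simp [pvColFold]
  | cons p t ih =>
    intro F G
    simp only [List.foldl_cons]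
    rw [pv_inner_range, ih]
    simp only [Prod.mk.injEq]
    refine ⟨?_, ?_⟩ <;>
    · apply List.map_congr_left
      intro c hc
      simp [pvColFold, pvColStep]
      split_ifs <;> rfl

-- one column: the running fold computes max + owner of the first maximum
theorem pv_colFold_spec :
    ∀ (ps : List (String × List Int)) (t : Nat) (v0 : Int) (n0 : String),
      pvColFold ps t (v0, n0) =
      ((ps.map (fun p => p.2.getD t 0)).foldl max v0,
        if v0 < (ps.map (fun p => p.2.getD t 0)).foldl max v0 then
          (ps.map (fun p => p.1)).getD
            ((PySem.List.index? (ps.map (fun p => p.2.getD t 0))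
              ((ps.map (fun p => p.2.getD t 0)).foldl max v0)).getD 0) ""
        else n0) := by
  intro ps
  induction ps with
  | nil => intro t v0 n0; simp [pvColFold]
  | cons q qs ih =>
    intro t v0 n0
    simp only [pvColFold, List.foldl_cons, List.map_cons] at *
    set x := q.2.getD t 0 with hx
    by_cases h0 : v0 < x
    · rw [show pvColStep (v0, n0) (x, q.1) = (x, q.1) by simp [pvColStep, h0]]
      rw [show (qs.foldl (fun a p => pvColStep a (p.2.getD t 0, p.1)) (x, q.1)) = _ from ih t x q.1]
      set M := (qs.map (fun p => p.2.getD t 0)).foldl max x with hM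
      have hxle : x ≤ M := (PySem.List.le_foldl_max _ _).1
      have hMfull : (List.foldl max (max v0 x) (qs.map fun p => p.2.getD t 0)) = M := by
        rw [max_eq_right (le_of_lt h0)]
      rw [hMfull]
      have hv0M : v0 < M := lt_of_lt_of_le h0 hxle
      simp only [if_pos hv0M]
      by_cases hxM : x < M
      · have hne : x ≠ M := ne_of_lt hxM
        rw [PySem.List.index?_cons_of_ne _ hne]
        have hmem : M ∈ qs.map (fun p => p.2.getD t 0) := by
          rcases PySem.List.foldl_max_mem (qs.map fun p => p.2.getD t 0) x with h | h
          · exact absurd h.symm (ne_of_lt hxM)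
          · exact h
        obtain ⟨i, hi⟩ := Option.isSome_iff_exists.mp ((PySem.List.index?_isSome_iff _ _).mpr hmem)
        rw [PySem.List.index?_eq_idxOf?] at hi
        simp only [List.getD] at hi ⊢
        simp [hi]
        exact fun h => absurd hxM (by omega)
      · have hxeq : x = M := le_antisymm hxle (not_lt.mp hxM)
        rw [hxeq, PySem.List.index?_cons_self]
        simp
    · rw [show pvColStep (v0, n0) (x, q.1) = (v0, n0) by simp [pvColStep, h0]]
      rw [show (qs.foldl (fun a p => pvColStep a (p.2.getD t 0, p.1)) (v0, n0)) = _ from ih t v0 n0]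
      set M := (qs.map (fun p => p.2.getD t 0)).foldl max v0 with hM
      have hv0le : v0 ≤ M := (PySem.List.le_foldl_max _ _).1
      have hMfull : (List.foldl max (max v0 x) (qs.map fun p => p.2.getD t 0)) = M := by
        rw [max_eq_left (not_lt.mp h0)]
      rw [hMfull]
      by_cases hv0M : v0 < M
      · have hxM : x < M := lt_of_le_of_lt (not_lt.mp h0) hv0M
        have hne : x ≠ M := ne_of_lt hxM
        rw [PySem.List.index?_cons_of_ne _ hne]
        have hmem : M ∈ qs.map (fun p => p.2.getD t 0) := by
          rcases PySem.List.foldl_max_mem (qs.map fun p => p.2.getD t 0) v0 with h | h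
          · exact absurd h.symm (ne_of_lt hv0M)
          · exact h
        obtain ⟨i, hi⟩ := Option.isSome_iff_exists.mp ((PySem.List.index?_isSome_iff _ _).mpr hmem)
        rw [PySem.List.index?_eq_idxOf?] at hi
        simp only [List.getD] at hi ⊢
        simp [hi]
      · simp [hv0M]

-- A's per-column result equals the column fold's owner
theorem pv_Acol (rest : List (String × List Int)) (t : Nat) (v0 : Int) (n0 : String) :
    (n0 :: rest.map (fun p => p.1)).getD
      ((PySem.List.index? (v0 :: rest.map (fun p => p.2.getD t 0))
        ((PySem.List.max? (v0 :: rest.map (fun p => p.2.getD t 0)) (fun x => x)).getD 0)).getD 0) ""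
    = (pvColFold rest t (v0, n0)).2 := by
  rw [PySem.List.max?_id_cons]
  set M := (rest.map (fun p => p.2.getD t 0)).foldl max v0 with hM
  rw [pv_colFold_spec]
  simp only [Option.getD_some, ← hM]
  by_cases hv0M : v0 < M
  · have hne : v0 ≠ M := ne_of_lt hv0M
    rw [PySem.List.index?_cons_of_ne _ hne]
    have hmem : M ∈ rest.map (fun p => p.2.getD t 0) := by
      rcases PySem.List.foldl_max_mem (rest.map fun p => p.2.getD t 0) v0 with h | h
      · exact absurd h.symm (ne_of_lt hv0M)
      · exact h
    obtain ⟨i, hi⟩ := Option.isSome_iff_exists.mp ((PySem.List.index?_isSome_iff _ _).mpr hmem)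
    rw [PySem.List.index?_eq_idxOf?] at hi
    simp only [List.getD] at hi ⊢
    simp [hi]
    exact fun h => absurd hv0M (by omega)
  · have hle : v0 ≤ M := (PySem.List.le_foldl_max _ _).1
    have : v0 = M := le_antisymm hle (not_lt.mp hv0M)
    rw [← this, PySem.List.index?_cons_self]
    simp

-- ===== VERDICT (by name: the statement is the Claim_ definition above) =====
theorem find_max_with_list_names_spec : Claim_equal_find_max_with_list_names := by
  intro d _
  unfold Spec_find_max_with_list_names find_max_with_list_names find_max_with_list_names_alt
  cases hitems : (PySem.Dict.ofList d).items with
  | nil =>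
    simp [PySem.Dict.keys, PySem.Dict.values, hitems, pyZipStar]
  | cons hd rest =>
    obtain ⟨n0, l0⟩ := hd
    simp only [PySem.Dict.keys, PySem.Dict.values, hitems, List.map_cons]
    set m := rest.foldl (fun a p => min a p.2.length) l0.length with hm
    have hm' : (rest.map (fun p => p.2)).foldl (fun a b => min a b.length) l0.length = m := by
      rw [List.foldl_map]
    unfold pyZipStar
    simp only [hm']
    rw [PySem.List.foldl_append_singleton_eq_map, List.nil_append, List.map_map]
    have hmle : m ≤ l0.length := pv_minfold_le rest l0.length
    rw [pv_take_eq_map_range l0 m hmle, pv_replicate_eq_map_range m n0]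
    rw [show (fun (st : List Int × List String) (p : String × List Int) =>
          (List.range m).foldl (fun st c =>
            if st.1.getD c 0 < p.2.getD c 0 then (st.1.set c (p.2.getD c 0), st.2.set c p.1)
            else st) st)
        = (fun st p => (List.range m).foldl (pvBStep p.2 p.1) st) from rfl]
    rw [pv_outer m rest (fun t => l0.getD t 0) (fun _ => n0)]
    apply List.map_congr_left
    intro t ht
    have := pv_Acol rest t (l0.getD t 0) n0
    simp only [List.map_cons, List.map_map, Function.comp, List.getD] at this ⊢
    exact this
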